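-- pv_equiv track=rewrite | github.com/frank93011/Big_data | version2.py | keyword_select
-- ===== SOURCE A (Python) =====
-- def keyword_select(docs, kewords):
--     selected = []
--     for text in docs:
--         for i in range(len(kewords)):
--             if kewords[i] in text:
--                 selected.append(text)
--                 break
--     return selected
-- ===== SOURCE B (Python) =====
-- def keyword_select(docs, kewords):
--     # keyword-major sieve: each keyword pass scans only the still-unmatched
--     # (index, doc) pairs, marking matches in a hit-mask; a keyword absent from the
--     # NUL-joined pending text is skipped wholesale (the join check never skips a
--     # keyword that occurs in some pending doc); mask compacted in original order.
--     hit = [False] * len(docs)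
--     pending = list(enumerate(docs))
--     big = "\x00".join(docs)
--     dirty = False
--     for k in kewords:
--         if not pending:
--             break
--         if dirty:
--             big = "\x00".join(t for _, t in pending)
--             dirty = False
--         if k not in big:
--             continue
--         still = []
--         for it in pending:
--             if k in it[1]:
--                 hit[it[0]] = True
--                 dirty = True
--             else:
--                 still.append(it)
--         pending = still
--     return [t for h, t in zip(hit, docs) if h]
-- ===== Notes on version B (the rewrite author's own statement) =====
-- stated objective: faster
-- what changed: B swaps the loop nesting into a keyword-major sieve: each keyword pass scans only the still-unmatched (index, doc) pairs kept in a shrinking pending list, a C-speed substring test on the NUL-joined pending text skips keywords that match no pending doc, and the boolean hit-mask is compacted in original order at the end; intended as faster by these two mechanisms, measured 1.9-2.3x (rev family) up to 6-16x (sorted family) in a timing run at its largest sizes.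
import Mathlib
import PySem

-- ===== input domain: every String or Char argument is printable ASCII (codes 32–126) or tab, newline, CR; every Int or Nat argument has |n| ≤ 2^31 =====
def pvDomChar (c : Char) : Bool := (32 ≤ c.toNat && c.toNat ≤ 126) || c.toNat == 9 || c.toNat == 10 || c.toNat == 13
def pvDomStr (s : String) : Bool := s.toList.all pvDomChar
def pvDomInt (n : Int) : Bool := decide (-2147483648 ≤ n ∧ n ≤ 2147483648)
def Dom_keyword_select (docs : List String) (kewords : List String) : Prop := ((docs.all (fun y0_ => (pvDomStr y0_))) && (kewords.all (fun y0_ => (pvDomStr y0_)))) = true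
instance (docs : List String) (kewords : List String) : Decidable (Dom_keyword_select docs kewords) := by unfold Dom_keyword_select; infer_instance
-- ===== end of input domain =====

-- B replaces A's document-major scan (inner keyword loop with break) by a keyword-major sieve
-- over the still-unmatched (index, doc) pairs with a hit-mask and a joined-text prefilter that
-- skips keywords occurring in no pending doc. Return values proved equal on all inputs.

-- ===== PORT A =====
-- inner loop: 'for i in range(len(kewords)): if kewords[i] in text: … break'
def kwHitLoop (text : String) : List String → Bool
  | [] => false
  | k :: rest => if PySem.Str.isIn k text then true else kwHitLoop text rest

def keyword_select (docs : List String) (kewords : List String) : List String :=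
  docs.foldl (fun selected text =>
    if kwHitLoop text kewords then selected ++ [text] else selected) []

-- ===== PORT B =====
-- inner loop: 'for it in pending: if k in it[1]: hit[it[0]] = True; dirty = True else: still.append(it)'
def sievePass (k : String) (hit : List Bool) (pending : List (Int × String)) (dirty : Bool) :
    List Bool × List (Int × String) × Bool :=
  pending.foldl (fun s it =>
    if PySem.Str.isIn k it.2 then (PySem.List.pySetD s.1 it.1 true, s.2.1, true)
    else (s.1, s.2.1 ++ [it], s.2.2)) (hit, [], dirty)

-- outer loop body: 'if not pending: break / if dirty: big = "\x00".join(…); dirty = False / if k not in big: continue / <pass>'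
def sieveStep (s : List Bool × List (Int × String) × String × Bool) (k : String) :
    List Bool × List (Int × String) × String × Bool :=
  if s.2.1.isEmpty then s
  else
    let bd := if s.2.2.2 then (PySem.Str.join "\x00" (s.2.1.map (fun it => it.2)), false)
              else s.2.2
    if PySem.Str.isIn k bd.1 = false then (s.1, s.2.1, bd)
    else
      let r := sievePass k s.1 s.2.1 bd.2
      (r.1, r.2.1, bd.1, r.2.2)

def keyword_select_alt (docs : List String) (kewords : List String) : List String :=
  let fin := kewords.foldl sieveStep
    (List.replicate docs.length false, PySem.List.enumerate docs 0,
     PySem.Str.join "\x00" docs, false)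
  ((fin.1.zip docs).filter (fun p => p.1)).map (fun p => p.2)

-- ===== PRECONDITION & SPEC =====
def Spec_keyword_select (docs : List String) (kewords : List String) (out : List String) : Prop := out = keyword_select_alt docs kewords
instance (docs : List String) (kewords : List String) (out : List String) : Decidable (Spec_keyword_select docs kewords out) := by unfold Spec_keyword_select; infer_instance

-- ===== CLAIM (what is proved, stated in full; the proofs are below) =====
def Claim_equal_keyword_select : Prop := ∀ (docs : List String) (kewords : List String), Dom_keyword_select docs kewords → Spec_keyword_select docs kewords (keyword_select docs kewords)

-- ===== LEMMAS AND PROOFS =====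

-- A's inner break-loop is 'any keyword is a substring'
theorem kwHitLoop_eq_any (text : String) (ks : List String) :
    kwHitLoop text ks = ks.any (fun k => PySem.Str.isIn k text) := by
  induction ks with
  | nil => rfl
  | cons k rest ih =>
      simp only [kwHitLoop, List.any_cons, ih]
      by_cases h : PySem.Str.isIn k text = true <;> simp [h]

-- A is a filter
theorem keyword_select_eq_filter (docs ks : List String) :
    keyword_select docs ks = docs.filter (fun t => ks.any (fun k => PySem.Str.isIn k t)) := by
  unfold keyword_select
  have key : ∀ (ds acc : List String),
      ds.foldl (fun selected text =>
        if kwHitLoop text ks then selected ++ [text] else selected) acc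
        = acc ++ ds.filter (fun t => kwHitLoop t ks) := by
    intro ds
    induction ds with
    | nil => intro acc; simp
    | cons t ts ih =>
        intro acc
        simp only [List.foldl_cons, List.filter_cons]
        by_cases h : kwHitLoop t ks = true
        · rw [if_pos h, if_pos h, ih, List.append_assoc]; rfl
        · rw [if_neg h, ih, if_neg (by simp [h])]
  rw [key docs [], List.nil_append]
  exact List.filter_congr (fun t _ => by rw [kwHitLoop_eq_any])

-- the hit-mask half of one sieve pass, projected out of the triple fold
def hitStep (k : String) (h : List Bool) (it : Int × String) : List Bool :=
  if PySem.Str.isIn k it.2 then PySem.List.pySetD h it.1 true else h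

-- split the triple fold of sievePass into its components
theorem sievePass_split (k : String) (P : List (Int × String))
    (hit : List Bool) (acc : List (Int × String)) (d : Bool) :
    P.foldl (fun s it =>
      if PySem.Str.isIn k it.2 then (PySem.List.pySetD s.1 it.1 true, s.2.1, true)
      else (s.1, s.2.1 ++ [it], s.2.2)) (hit, acc, d)
    = (P.foldl (hitStep k) hit,
       acc ++ P.filter (fun it => !PySem.Str.isIn k it.2),
       d || P.any (fun it => PySem.Str.isIn k it.2)) := by
  induction P generalizing hit acc d with
  | nil => simp
  | cons it rest ih =>
      simp only [List.foldl_cons, List.filter_cons, List.any_cons]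
      by_cases h : PySem.Str.isIn k it.2 = true
      · simp only [h, if_pos, hitStep, Bool.not_true, ih, Bool.true_or, Bool.or_true]; rfl
      · simp only [h, Bool.false_eq_true, if_false, hitStep, Bool.not_false, ih,
          if_true, List.append_assoc, List.singleton_append]
        rw [Bool.false_or]

theorem length_hitStep (k : String) (hit : List Bool) (it : Int × String) :
    (hitStep k hit it).length = hit.length := by
  unfold hitStep; split <;> simp [PySem.List.length_pySetD]

theorem length_foldl_hitStep (k : String) (P : List (Int × String)) (hit : List Bool) :
    (P.foldl (hitStep k) hit).length = hit.length := by
  induction P generalizing hit with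
  | nil => rfl
  | cons it rest ih => rw [List.foldl_cons, ih, length_hitStep]

-- pointwise value of the hit-mask after one pass
theorem foldl_hitStep_getD (k : String) (P : List (Int × String)) (hit : List Bool)
    (hb : ∀ it ∈ P, 0 ≤ it.1 ∧ it.1 < (hit.length : Int)) (j : Nat) :
    (P.foldl (hitStep k) hit).getD j false
      = (hit.getD j false || P.any (fun it => it.1 == (j : Int) && PySem.Str.isIn k it.2)) := by
  induction P generalizing hit with
  | nil => simp
  | cons it rest ih =>
      obtain ⟨h0, hlt⟩ := hb it (by simp)
      have hlen : (hitStep k hit it).length = hit.length := length_hitStep k hit it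
      have hrest : ∀ it' ∈ rest, 0 ≤ it'.1 ∧ it'.1 < ((hitStep k hit it).length : Int) := by
        intro it' hm
        rw [hlen]
        exact hb it' (List.mem_cons_of_mem _ hm)
      rw [List.foldl_cons, List.any_cons, ih (hitStep k hit it) hrest]
      have hget : (hitStep k hit it).getD j false
          = (hit.getD j false || (it.1 == (j : Int) && PySem.Str.isIn k it.2)) := by
        unfold hitStep
        by_cases h : PySem.Str.isIn k it.2 = true
        · rw [if_pos h, PySem.List.pySetD_of_nonneg _ _ h0]
          by_cases hj : it.1 = (j : Int)
          · have hjn : it.1.toNat = j := by omega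
            have hjl : j < hit.length := by omega
            rw [List.getD_eq_getElem?_getD, ← hjn,
              List.getElem?_set_self (by omega)]
            rw [PySem.Str.isIn_eq] at h
            simp [hj, h]
          · have hjn : it.1.toNat ≠ j := by omega
            rw [List.getD_eq_getElem?_getD, List.getElem?_set_ne hjn,
              ← List.getD_eq_getElem?_getD]
            simp [hj]
        · rw [if_neg h]
          simp only [h, Bool.and_false, Bool.or_false]
      rw [hget, Bool.or_assoc]

-- membership bound for filtered enumerate pairs
theorem enum_filter_bounds (docs : List String) (q : Int × String → Bool)
    (it : Int × String) (hm : it ∈ (PySem.List.enumerate docs 0).filter q) :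
    0 ≤ it.1 ∧ it.1 < (docs.length : Int) := by
  have hm' := List.mem_of_mem_filter hm
  rw [PySem.List.mem_enumerate_iff] at hm'
  obtain ⟨k, hk, rfl⟩ := hm'
  constructor <;> simp <;> omega

-- the 'index == j' scan over filtered enumerate picks out docs[j]
theorem enum_filter_any (docs : List String) (p : String → Bool) (k : String)
    (j : Nat) (hj : j < docs.length) :
    ((PySem.List.enumerate docs 0).filter (fun it => !p it.2)).any
        (fun it => it.1 == (j : Int) && PySem.Str.isIn k it.2)
      = (!p docs[j] && PySem.Str.isIn k docs[j]) := by
  rw [Bool.eq_iff_iff]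
  simp only [List.any_eq_true, List.mem_filter, PySem.List.mem_enumerate_iff]
  constructor
  · rintro ⟨it, ⟨⟨m, hm, rfl⟩, hp⟩, hq⟩
    simp only [beq_iff_eq, Bool.and_eq_true] at hq hp ⊢
    have : m = j := by omega
    subst this
    exact ⟨hp, hq.2⟩
  · intro h
    refine ⟨((j : Int), docs[j]), ⟨⟨j, hj, by simp⟩, ?_⟩, ?_⟩ <;>
      simp_all

-- every still-unmatched doc appears among the pending pairs
theorem mem_pending_of_unmatched (docs : List String) (p : String → Bool)
    (t : String) (ht : t ∈ docs) (hp : p t = false) :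
    ∃ it ∈ (PySem.List.enumerate docs 0).filter (fun it => !p it.2), it.2 = t := by
  refine ⟨((0 : Int) + (docs.idxOf t : Int), t), List.mem_filter.2 ⟨?_, by simp [hp]⟩, rfl⟩
  rw [PySem.List.mem_enumerate_iff]
  exact ⟨docs.idxOf t, List.idxOf_lt_length_of_mem ht, by
    simp [List.getElem_idxOf (List.idxOf_lt_length_of_mem ht)]⟩

-- when no pending doc contains k, the predicate 'p or contains k' agrees with p on the state
theorem state_congr_noMatch (docs : List String) (p : String → Bool) (k : String)
    (hall : ∀ it ∈ (PySem.List.enumerate docs 0).filter (fun it => !p it.2),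
      PySem.Str.isIn k it.2 = false) :
    docs.map p = docs.map (fun t => p t || PySem.Str.isIn k t)
    ∧ (PySem.List.enumerate docs 0).filter (fun it => !p it.2)
      = (PySem.List.enumerate docs 0).filter
          (fun it => !(p it.2 || PySem.Str.isIn k it.2)) := by
  have hdoc : ∀ t ∈ docs, (p t || PySem.Str.isIn k t) = p t := by
    intro t ht
    by_cases hp : p t = true
    · simp [hp]
    · have hp' : p t = false := by simp at hp; exact hp
      obtain ⟨it, hmem, rfl⟩ := mem_pending_of_unmatched docs p t ht hp'
      have hh := hall it hmem
      rw [PySem.Str.isIn_eq] at hh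
      simp [hp', hh]
  constructor
  · exact List.map_congr_left (fun t ht => (hdoc t ht).symm)
  · refine (List.filter_congr (fun it hmem => ?_)).symm
    rw [PySem.List.mem_enumerate_iff] at hmem
    obtain ⟨m, hm, rfl⟩ := hmem
    rw [hdoc _ (docs.getElem_mem hm)]

-- a doc in the list is a substring of the NUL-joined text
theorem isIn_join_of_mem (k : String) (t : String) (ts : List String)
    (ht : t ∈ ts) (hk : PySem.Str.isIn k t = true) :
    PySem.Str.isIn k (PySem.Str.join "\x00" ts) = true := by
  rw [PySem.Str.isIn_eq, PySem.Chars.isIn_iff_infix] at hk ⊢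
  rw [PySem.Str.toList_join]
  refine hk.trans ?_
  clear hk
  induction ts with
  | nil => cases ht
  | cons x rest ih =>
      rcases List.mem_cons.1 ht with h | h
      · subst h
        cases rest with
        | nil =>
            rw [List.map_cons, List.map_nil, PySem.Chars.join_singleton]
        | cons y rest' =>
            rw [List.map_cons, List.map_cons, PySem.Chars.join_cons_cons,
              List.append_assoc]
            exact (List.prefix_append _ _).isInfix
      · cases rest with
        | nil => cases h
        | cons y rest' =>
            rw [List.map_cons, List.map_cons, PySem.Chars.join_cons_cons]
            have hrec := ih h
            rw [List.map_cons] at hrec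
            exact hrec.trans (List.suffix_append _ _).isInfix

-- one sieve pass advances the invariant from predicate p to 'p or contains k'
theorem sievePass_inv (docs : List String) (p : String → Bool) (k : String) (d : Bool) :
    sievePass k (docs.map p)
        ((PySem.List.enumerate docs 0).filter (fun it => !p it.2)) d
      = (docs.map (fun t => p t || PySem.Str.isIn k t),
         (PySem.List.enumerate docs 0).filter
           (fun it => !(p it.2 || PySem.Str.isIn k it.2)),
         d || ((PySem.List.enumerate docs 0).filter (fun it => !p it.2)).any
           (fun it => PySem.Str.isIn k it.2)) := by
  unfold sievePass
  rw [sievePass_split, List.nil_append, Prod.mk.injEq]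
  refine ⟨?_, ?_⟩
  · -- hit component
    apply List.ext_getElem
    · simp [length_foldl_hitStep]
    · intro j hj hj'
      have hjd : j < docs.length := by simpa [length_foldl_hitStep] using hj
      have hb : ∀ it ∈ (PySem.List.enumerate docs 0).filter (fun it => !p it.2),
          0 ≤ it.1 ∧ it.1 < (((docs.map p).length : Nat) : Int) := by
        intro it hm
        simpa using enum_filter_bounds docs _ it hm
      have := foldl_hitStep_getD k _ (docs.map p) hb j
      rw [enum_filter_any docs p k j hjd] at this
      have hmap : (docs.map p).getD j false = p docs[j] := by
        simp [List.getD_eq_getElem?_getD, hjd]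
      rw [List.getElem_eq_getD (fallback := false), this, hmap,
        List.getElem_eq_getD (fallback := false)]
      have hmap' : (docs.map (fun t => p t || PySem.Str.isIn k t)).getD j false
          = (p docs[j] || PySem.Str.isIn k docs[j]) := by
        simp [List.getD_eq_getElem?_getD, hjd]
      rw [hmap']
      by_cases h1 : p docs[j] = true <;> by_cases h2 : PySem.Str.isIn k docs[j] = true <;>
        simp [h1, h2]
  · -- pending and dirty components
    rw [Prod.mk.injEq]
    refine ⟨?_, rfl⟩
    rw [List.filter_filter]
    exact List.filter_congr (fun it _ => by
      by_cases h1 : p it.2 = true <;> by_cases h2 : PySem.Str.isIn k it.2 = true <;>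
        simp [h1, h2])

-- once pending is empty the guarded fold is the identity
theorem foldl_guard_empty (ks : List String) (hit : List Bool) (big : String) (d : Bool) :
    ks.foldl sieveStep (hit, ([] : List (Int × String)), big, d) = (hit, [], big, d) := by
  induction ks with
  | nil => rfl
  | cons k rest ih => simpa [sieveStep] using ih

-- the sieve invariant over the whole keyword fold
theorem foldl_sieve_inv (docs : List String) (ks : List String) :
    ∀ (p : String → Bool) (big : String) (dirty : Bool),
    (dirty = true ∨ big = PySem.Str.join "\x00"
        (((PySem.List.enumerate docs 0).filter (fun it => !p it.2)).map (fun it => it.2))) →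
    ∃ big' dirty',
      ks.foldl sieveStep
          (docs.map p, (PySem.List.enumerate docs 0).filter (fun it => !p it.2), big, dirty)
        = (docs.map (fun t => p t || ks.any (fun k => PySem.Str.isIn k t)),
           (PySem.List.enumerate docs 0).filter
             (fun it => !(p it.2 || ks.any (fun k => PySem.Str.isIn k it.2))),
           big', dirty') := by
  induction ks with
  | nil =>
      intro p big dirty _
      exact ⟨big, dirty, by simp⟩
  | cons k rest ih =>
      intro p big dirty hbig
      rw [List.foldl_cons]
      by_cases he : ((PySem.List.enumerate docs 0).filter (fun it => !p it.2)).isEmpty = true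
      · -- pending empty: the guard freezes the state
        have heq : (PySem.List.enumerate docs 0).filter (fun it => !p it.2) = [] := by
          rwa [List.isEmpty_iff] at he
        have hstep : sieveStep
            (docs.map p, (PySem.List.enumerate docs 0).filter (fun it => !p it.2), big, dirty) k
            = (docs.map p, (PySem.List.enumerate docs 0).filter (fun it => !p it.2), big, dirty) := by
          unfold sieveStep
          rw [if_pos (by rw [heq]; rfl)]
        rw [hstep, heq, foldl_guard_empty]
        rw [List.filter_eq_nil_iff] at heq
        have hptrue : ∀ t ∈ docs, p t = true := by
          intro t ht
          by_cases hp : p t = true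
          · exact hp
          · obtain ⟨it, hmem, rfl⟩ :=
              mem_pending_of_unmatched docs p t ht (by simp at hp; exact hp)
            exact absurd (by simpa using heq _ (List.mem_of_mem_filter hmem)) hp
        refine ⟨big, dirty, ?_⟩
        rw [Prod.mk.injEq, Prod.mk.injEq]
        refine ⟨?_, ?_, rfl⟩
        · exact List.map_congr_left (fun t ht => by simp [hptrue t ht])
        · symm
          rw [List.filter_eq_nil_iff]
          intro it hm
          rw [PySem.List.mem_enumerate_iff] at hm
          obtain ⟨m, hmlt, rfl⟩ := hm
          simp [hptrue _ (docs.getElem_mem hmlt)]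
      · -- pending nonempty: rebuild big if dirty, then prefilter or pass
        have hbd : (if dirty then
              (PySem.Str.join "\x00"
                (((PySem.List.enumerate docs 0).filter (fun it => !p it.2)).map (fun it => it.2)),
               false)
            else (big, dirty))
            = (PySem.Str.join "\x00"
                (((PySem.List.enumerate docs 0).filter (fun it => !p it.2)).map (fun it => it.2)),
               false) := by
          cases hd : dirty with
          | true => rfl
          | false =>
              rcases hbig with h | h
              · exact absurd h (by simp [hd])
              · simp [h]
        have hstep : sieveStep
            (docs.map p, (PySem.List.enumerate docs 0).filter (fun it => !p it.2), big, dirty) k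
            = (let bd := (PySem.Str.join "\x00"
                (((PySem.List.enumerate docs 0).filter (fun it => !p it.2)).map (fun it => it.2)),
                (false : Bool));
               if PySem.Str.isIn k bd.1 = false then
                 (docs.map p, (PySem.List.enumerate docs 0).filter (fun it => !p it.2), bd)
               else
                 let r := sievePass k (docs.map p)
                   ((PySem.List.enumerate docs 0).filter (fun it => !p it.2)) bd.2
                 (r.1, r.2.1, bd.1, r.2.2)) := by
          unfold sieveStep
          rw [if_neg (by simpa using he)]
          simp only [hbd]
        rw [hstep]
        set big1 := PySem.Str.join "\x00"
          (((PySem.List.enumerate docs 0).filter (fun it => !p it.2)).map (fun it => it.2)) with hbig1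
        by_cases hin : PySem.Str.isIn k big1 = false
        · -- prefilter: k occurs in no pending doc, the pass is skipped
          rw [if_pos hin]
          have hall : ∀ it ∈ (PySem.List.enumerate docs 0).filter (fun it => !p it.2),
              PySem.Str.isIn k it.2 = false := by
            intro it hm
            by_cases h : PySem.Str.isIn k it.2 = true
            · exact absurd (isIn_join_of_mem k it.2 _ (List.mem_map_of_mem hm) h)
                (by rw [← hbig1]; intro hc; rw [hc] at hin; simp at hin)
            · simpa using h
          obtain ⟨hm, hf⟩ := state_congr_noMatch docs p k hall
          rw [show (docs.map p,
                (PySem.List.enumerate docs 0).filter (fun it => !p it.2), big1, false)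
              = (docs.map (fun t => p t || PySem.Str.isIn k t),
                 (PySem.List.enumerate docs 0).filter
                   (fun it => !(p it.2 || PySem.Str.isIn k it.2)), big1, false) from by
            rw [Prod.mk.injEq, Prod.mk.injEq]
            exact ⟨hm, hf, rfl⟩]
          obtain ⟨big', dirty', hrec⟩ := ih (fun t => p t || PySem.Str.isIn k t) big1 false
            (Or.inr (by rw [hbig1, hf]))
          refine ⟨big', dirty', ?_⟩
          rw [hrec, Prod.mk.injEq, Prod.mk.injEq]
          refine ⟨?_, ?_, rfl⟩
          · exact List.map_congr_left (fun t _ => by simp [Bool.or_assoc])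
          · exact List.filter_congr (fun it _ => by simp [Bool.or_assoc])
        · -- pass: run the sieve over pending
          rw [if_neg hin, sievePass_inv]
          set anyc := ((PySem.List.enumerate docs 0).filter (fun it => !p it.2)).any
            (fun it => PySem.Str.isIn k it.2) with hanyc
          have hinv : ((false || anyc) = true) ∨ big1 = PySem.Str.join "\x00"
              (((PySem.List.enumerate docs 0).filter
                (fun it => !(p it.2 || PySem.Str.isIn k it.2))).map (fun it => it.2)) := by
            cases ha : anyc with
            | true => exact Or.inl (by simp)
            | false =>
                refine Or.inr ?_
                have hall : ∀ it ∈ (PySem.List.enumerate docs 0).filter (fun it => !p it.2),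
                    PySem.Str.isIn k it.2 = false := by
                  rw [hanyc] at ha
                  intro it hm
                  exact Bool.eq_false_iff.mpr ((List.any_eq_false.1 ha) it hm)
                obtain ⟨_, hf⟩ := state_congr_noMatch docs p k hall
                rw [hbig1, hf]
          obtain ⟨big', dirty', hrec⟩ := ih (fun t => p t || PySem.Str.isIn k t) big1
            (false || anyc) hinv
          refine ⟨big', dirty', ?_⟩
          rw [hrec, Prod.mk.injEq, Prod.mk.injEq]
          refine ⟨?_, ?_, rfl⟩
          · exact List.map_congr_left (fun t _ => by simp [Bool.or_assoc])
          · exact List.filter_congr (fun it _ => by simp [Bool.or_assoc])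

-- compaction of a mask built by map is a filter
theorem filter_zip_map (p : String → Bool) (docs : List String) :
    (((docs.map p).zip docs).filter (fun q => q.1)).map (fun q => q.2) = docs.filter p := by
  induction docs with
  | nil => rfl
  | cons t ts ih =>
      by_cases h : p t = true <;> simp [List.filter_cons, h, ih]

-- ===== VERDICT (by name: the statement is the Claim_ definition above) =====
theorem keyword_select_spec : Claim_equal_keyword_select := by
  intro docs ks _
  show keyword_select docs ks = keyword_select_alt docs ks
  rw [keyword_select_eq_filter]
  unfold keyword_select_alt
  have h0 : (List.replicate docs.length false, PySem.List.enumerate docs 0,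
      PySem.Str.join "\x00" docs, (false : Bool))
      = (docs.map (fun _ => false),
         (PySem.List.enumerate docs 0).filter (fun it => !(false : Bool)),
         PySem.Str.join "\x00" docs, (false : Bool)) := by
    simp [List.map_const']
  have hj : PySem.Str.join "\x00" docs = PySem.Str.join "\x00"
      (((PySem.List.enumerate docs 0).filter (fun it => !(false : Bool))).map (fun it => it.2)) := by
    simp [PySem.List.map_snd_enumerate]
  obtain ⟨big', dirty', hfin⟩ := foldl_sieve_inv docs ks (fun _ => false)
    (PySem.Str.join "\x00" docs) false (Or.inr hj)
  rw [h0, hfin]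
  simp only [Bool.false_or]
  rw [filter_zip_map]
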